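-- pv_equiv track=rewrite | github.com/patpij2/Logia-Competition-All-Solutions | logia 18/2/neony1.py | neon
-- ===== SOURCE A (Python) =====
-- def neon(tab):
--
--     wyniki = []
--     for i in range(len(tab)):
--         for j in range(len(tab)-i):
--             if tab[i] != tab[j]:
--                 naj = tab[i]+tab[j]+abs(i-j)*2
--                 wyniki.append(naj)
--
--     return max(wyniki)
-- ===== SOURCE B (Python) =====
-- def neon(tab):
--     # O(n) sweep: widen the window [i+1, n-1-i] from the middle outwards while
--     # keeping the best and best-with-different-value maxima of tab[j]+2*j.
--     n = len(tab)
--     mid = n // 2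
--     best = None
--     v1 = t1 = v2 = None
--     for k in range(mid):
--         i = mid - 1 - k
--         lo = i + 1
--         hi = n - 1 - i
--         for j in ((lo,) if hi == lo else (lo, hi)):
--             v = tab[j] + 2 * j
--             t = tab[j]
--             if v1 is None:
--                 v1, t1 = v, t
--             elif t == t1:
--                 v1 = max(v1, v)
--             elif v > v1:
--                 v2, v1, t1 = v1, v, t
--             else:
--                 v2 = v if v2 is None else max(v2, v)
--         cand = v2 if t1 == tab[i] else v1
--         if cand is not None:
--             c = tab[i] - 2 * i + cand
--             best = c if best is None else max(best, c)
--     if best is None: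
--         raise ValueError("no valid pair")
--     return best
-- ===== Notes on version B (the rewrite author's own statement) =====
-- stated objective: faster
-- what changed: A scans all O(n^2) index pairs (i,j) with i+j<n; B makes one O(n) middle-out sweep over i = n//2-1 .. 0, maintaining for the growing window [i+1, n-1-i] the running maximum of tab[j]+2j together with the best such maximum over a different tab-value (to honour the tab[i] != tab[j] exclusion), combining each i with that window maximum.
import Mathlib
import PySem

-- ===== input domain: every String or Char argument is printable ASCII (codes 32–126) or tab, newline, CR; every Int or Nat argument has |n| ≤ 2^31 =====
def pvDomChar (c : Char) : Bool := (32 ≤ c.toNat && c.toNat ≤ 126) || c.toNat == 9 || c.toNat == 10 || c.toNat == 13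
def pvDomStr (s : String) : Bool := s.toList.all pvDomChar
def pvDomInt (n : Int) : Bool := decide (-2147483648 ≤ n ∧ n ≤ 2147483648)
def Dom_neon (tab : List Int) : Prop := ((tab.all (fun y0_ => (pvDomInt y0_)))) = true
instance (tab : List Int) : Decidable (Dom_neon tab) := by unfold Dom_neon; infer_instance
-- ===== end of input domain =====

-- B replaces A's O(n^2) double loop by an O(n) middle-out sweep that keeps the window
-- maximum of tab[j]+2j together with the best such maximum over a different tab-value.

-- ===== PORT A =====
def neon (tab : List Int) : Int :=
  let n : Nat := tab.length
  let wyniki : List Int :=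
    (PySem.List.pyRange 0 (n : Int)).foldl (fun acc i =>
      (PySem.List.pyRange 0 ((n : Int) - i)).foldl (fun acc j =>
        if PySem.List.pyGetD tab i 0 ≠ PySem.List.pyGetD tab j 0 then
          acc ++ [PySem.List.pyGetD tab i 0 + PySem.List.pyGetD tab j 0 + |i - j| * 2]
        else acc) acc) []
  -- Python's max(wyniki) raises ValueError on an empty list; Pre_neon excludes that case.
  (PySem.List.max? wyniki (fun x => x)).getD 0

-- ===== PORT B =====
-- inner 'for j in …' body of Source B: fold one index into the (v1, t1, v2) window state
def neonAdd (tab : List Int) (st : Option (Int × Int) × Option Int) (j : Nat) :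
    Option (Int × Int) × Option Int :=
  let v := PySem.List.pyGetD tab (j : Int) 0 + 2 * (j : Int)
  let t := PySem.List.pyGetD tab (j : Int) 0
  match st with
  | (none, v2) => (some (v, t), v2)
  | (some (v1, t1), v2) =>
    if t = t1 then (some (max v1 v, t1), v2)
    else if v > v1 then (some (v, t), some v1)
    else (some (v1, t1), some (match v2 with | none => v | some w => max w v))

-- one iteration of Source B's main loop (k ↦ i = mid-1-k)
def neonStep (tab : List Int) (n mid : Nat)
    (st : Option Int × (Option (Int × Int) × Option Int)) (k : Nat) :
    Option Int × (Option (Int × Int) × Option Int) :=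
  let i := mid - 1 - k
  let lo := i + 1
  let hi := n - 1 - i
  let w := if hi = lo then neonAdd tab st.2 lo else neonAdd tab (neonAdd tab st.2 lo) hi
  let ti := PySem.List.pyGetD tab (i : Int) 0
  let cand : Option Int :=
    match w.1 with
    | none => none
    | some (v1, t1) => if t1 = ti then w.2 else some v1
  match cand with
  | none => (st.1, w)
  | some c =>
    let c2 := ti - 2 * (i : Int) + c
    (some (match st.1 with | none => c2 | some b => max b c2), w)

def neon_alt (tab : List Int) : Int :=
  let n := tab.length
  let mid := n / 2
  let res := (List.range mid).foldl (neonStep tab n mid) (none, (none, none))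
  -- Source B raises ValueError when best is still None; Pre_neon excludes that case.
  res.1.getD 0

-- ===== PRECONDITION & SPEC =====
-- Pre_ excludes exactly the inputs on which Python A raises ValueError (max() of an
-- empty candidate list): lists in which no two elements differ; Source B likewise raises
-- ValueError there.
def Pre_neon (tab : List Int) : Prop := ∃ x ∈ tab, ∃ y ∈ tab, x ≠ y
instance (tab : List Int) : Decidable (Pre_neon tab) := by unfold Pre_neon; infer_instance

def pvWitness_neon : List Int := [1, 2]

def Spec_neon (tab : List Int) (out : Int) : Prop := out = neon_alt tab
instance (tab : List Int) (out : Int) : Decidable (Spec_neon tab out) := by unfold Spec_neon; infer_instance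

-- ===== CLAIM (what is proved, stated in full; the proofs are below) =====
def Claim_equal_neon : Prop := ∀ (tab : List Int), Dom_neon tab → Pre_neon tab → Spec_neon tab (neon tab)

-- ===== LEMMAS AND PROOFS =====

-- entry at a nonnegative in-range index, pair score, and the per-index window key
def gN (tab : List Int) (j : Nat) : Int := tab.getD j 0
def scoreN (tab : List Int) (i j : Nat) : Int := gN tab i + gN tab j + |(i : Int) - (j : Int)| * 2
def wkey (tab : List Int) (j : Nat) : Int := gN tab j + 2 * (j : Int)

-- "o is the maximum of the set S" (none ↔ S is empty)
def OMaxOf (S : Int → Prop) : Option Int → Prop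
  | none => ∀ x, ¬ S x
  | some m => S m ∧ ∀ x, S x → x ≤ m

theorem OMaxOf_unique {S : Int → Prop} {o₁ o₂ : Option Int}
    (h₁ : OMaxOf S o₁) (h₂ : OMaxOf S o₂) : o₁ = o₂ := by
  cases o₁ with
  | none => cases o₂ with
    | none => rfl
    | some m => exact absurd h₂.1 (h₁ m)
  | some m => cases o₂ with
    | none => exact absurd h₁.1 (h₂ m)
    | some m' => simp only [OMaxOf] at h₁ h₂
                 exact congrArg some (le_antisymm (h₂.2 m h₁.1) (h₁.2 m' h₂.1))

theorem OMaxOf_shift {T : Int → Prop} {c a : Int} (h : OMaxOf T (some c)) :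
    OMaxOf (fun x => ∃ y, T y ∧ x = a + y) (some (a + c)) := by
  refine ⟨⟨c, h.1, rfl⟩, ?_⟩
  rintro x ⟨y, hy, rfl⟩
  have := h.2 y hy
  omega

theorem OMaxOf_combine {S T : Int → Prop} {o : Option Int} {c : Int}
    (hS : OMaxOf S o) (hT : OMaxOf T (some c)) :
    OMaxOf (fun x => S x ∨ T x) (some (match o with | none => c | some b => max b c)) := by
  cases o with
  | none =>
    exact ⟨Or.inr hT.1, fun x hx => hx.elim (fun h => absurd h (hS x)) (hT.2 x)⟩
  | some b =>
    constructor
    · rcases le_total b c with h | h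
      · exact Or.inr (by simpa [max_eq_right h] using hT.1)
      · exact Or.inl (by simpa [max_eq_left h] using hS.1)
    · rintro x (hx | hx)
      · exact le_trans (hS.2 x hx) (le_max_left _ _)
      · exact le_trans (hT.2 x hx) (le_max_right _ _)

-- ===== A-side characterisation =====

def wynikiL (tab : List Int) : List Int :=
  (List.range tab.length).flatMap (fun i =>
    ((List.range (tab.length - i)).filter (fun j => decide (gN tab i ≠ gN tab j))).map
      (fun j => scoreN tab i j))

theorem neon_eq_max (tab : List Int) :
    neon tab = (PySem.List.max? (wynikiL tab) (fun x => x)).getD 0 := by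
  simp only [neon]
  rw [PySem.List.pyRange_zero_natCast, List.foldl_map]
  have hbody : ∀ k ∈ List.range tab.length, ∀ (acc : List Int),
      (PySem.List.pyRange 0 ((tab.length : Int) - (k : Int))).foldl (fun acc j =>
        if PySem.List.pyGetD tab (k : Int) 0 ≠ PySem.List.pyGetD tab j 0 then
          acc ++ [PySem.List.pyGetD tab (k : Int) 0 + PySem.List.pyGetD tab j 0 + |(k : Int) - j| * 2]
        else acc) acc
      = acc ++ ((List.range (tab.length - k)).filter (fun j => decide (gN tab k ≠ gN tab j))).map
          (fun j => scoreN tab k j) := by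
    intro k hk acc
    rw [List.mem_range] at hk
    have hcast : ((tab.length : Int) - (k : Int)) = ((tab.length - k : Nat) : Int) := by omega
    rw [hcast, PySem.List.pyRange_zero_natCast, List.foldl_map]
    have hpt : ∀ (acc : List Int) (j : Nat),
        (if PySem.List.pyGetD tab (k : Int) 0 ≠ PySem.List.pyGetD tab (j : Int) 0 then
          acc ++ [PySem.List.pyGetD tab (k : Int) 0 + PySem.List.pyGetD tab (j : Int) 0 + |(k : Int) - (j : Int)| * 2]
        else acc)
        = (if gN tab k ≠ gN tab j then acc ++ [scoreN tab k j] else acc) := by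
      intro acc j
      simp [PySem.List.pyGetD_natCast, gN, scoreN]
    simp only [hpt]
    exact PySem.List.foldl_append_ite (fun j => gN tab k ≠ gN tab j) (fun j => scoreN tab k j) _ _
  rw [PySem.List.foldl_congr_mem' _ _ (fun (acc : List Int) (k : Nat) => acc ++
      ((List.range (tab.length - k)).filter (fun j => decide (gN tab k ≠ gN tab j))).map
        (fun j => scoreN tab k j)) _ hbody]
  rw [PySem.List.foldl_append_eq_flatMap, List.nil_append]
  rfl

-- the values A collects: ordered pairs (i, j), j < n - i, with different entries
def ValidScore (tab : List Int) (x : Int) : Prop :=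
  ∃ i j : Nat, i < tab.length ∧ j < tab.length - i ∧ gN tab i ≠ gN tab j ∧ x = scoreN tab i j

theorem mem_wynikiL {tab : List Int} {x : Int} : x ∈ wynikiL tab ↔ ValidScore tab x := by
  simp [wynikiL, ValidScore, List.mem_flatMap, List.mem_map, List.mem_filter, List.mem_range]
  constructor
  · rintro ⟨i, hi, j, ⟨hj, hne⟩, rfl⟩; exact ⟨i, hi, j, hj, hne, rfl⟩
  · rintro ⟨i, hi, j, hj, hne, rfl⟩; exact ⟨i, hi, j, ⟨hj, hne⟩, rfl⟩

theorem A_omax (tab : List Int) :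
    OMaxOf (ValidScore tab) (PySem.List.max? (wynikiL tab) (fun x => x)) := by
  cases h : PySem.List.max? (wynikiL tab) (fun x => x) with
  | none =>
    have hnil := (PySem.List.max?_eq_none_iff (wynikiL tab) (fun x => x)).mp h
    intro x hx
    have := mem_wynikiL.mpr hx
    simp [hnil] at this
  | some m =>
    exact ⟨mem_wynikiL.mp (PySem.List.max?_mem h),
           fun x hx => PySem.List.max?_isMax h x (mem_wynikiL.mpr hx)⟩

-- ===== B-side invariant =====

-- pairs covered after K iterations of the sweep (i from mid-1 down to mid-K)
def covered (tab : List Int) (K : Nat) (x : Int) : Prop :=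
  ∃ i j : Nat, tab.length / 2 - K ≤ i ∧ i < j ∧ i + j < tab.length ∧
    gN tab i ≠ gN tab j ∧ x = scoreN tab i j

-- window of j-indices held in the (v1, t1, v2) state after K iterations
def WSet (tab : List Int) (K : Nat) (j : Nat) : Prop :=
  tab.length / 2 - K + 1 ≤ j ∧ j + (tab.length / 2 - K) + 1 ≤ tab.length

def WinInv (tab : List Int) (W : Nat → Prop) (st : Option (Int × Int) × Option Int) : Prop :=
  match st with
  | (none, v2) => (∀ j, ¬ W j) ∧ v2 = none
  | (some (v1, t1), v2) =>
      (∃ j, W j ∧ wkey tab j = v1 ∧ gN tab j = t1) ∧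
      (∀ j, W j → wkey tab j ≤ v1) ∧
      OMaxOf (fun x => ∃ j, W j ∧ gN tab j ≠ t1 ∧ wkey tab j = x) v2

theorem OMaxOf_congr {S T : Int → Prop} {o : Option Int}
    (hST : ∀ x, S x ↔ T x) (h : OMaxOf S o) : OMaxOf T o := by
  cases o with
  | none => exact fun x hx => h x ((hST x).mpr hx)
  | some m => exact ⟨(hST m).mp h.1, fun x hx => h.2 x ((hST x).mpr hx)⟩

theorem WinInv_some (tab : List Int) (W : Nat → Prop) (v1 t1 : Int) (v2 : Option Int) :
    WinInv tab W (some (v1, t1), v2) ↔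
      ((∃ j, W j ∧ wkey tab j = v1 ∧ gN tab j = t1) ∧
       (∀ j, W j → wkey tab j ≤ v1) ∧
       OMaxOf (fun x => ∃ j, W j ∧ gN tab j ≠ t1 ∧ wkey tab j = x) v2) := Iff.rfl

theorem add_inv {tab : List Int} {W : Nat → Prop} {st : Option (Int × Int) × Option Int}
    (h : WinInv tab W st) (j : Nat) :
    WinInv tab (fun j' => j' = j ∨ W j') (neonAdd tab st j) := by
  obtain ⟨o, v2⟩ := st
  have hv : PySem.List.pyGetD tab (j : Int) 0 + 2 * (j : Int) = wkey tab j := by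
    simp [wkey, gN, PySem.List.pyGetD_natCast]
  have ht : PySem.List.pyGetD tab (j : Int) 0 = gN tab j := by
    simp [gN, PySem.List.pyGetD_natCast]
  cases o with
  | none =>
    obtain ⟨hW, rfl⟩ := h
    simp only [neonAdd]
    rw [hv, ht, WinInv_some]
    refine ⟨⟨j, Or.inl rfl, rfl, rfl⟩, ?_, ?_⟩
    · rintro j' (rfl | hj')
      · exact le_refl _
      · exact absurd hj' (hW j')
    · rintro x ⟨j', (rfl | hj'), hne, hk'⟩
      · exact hne rfl
      · exact absurd hj' (hW j')
  | some p =>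
    obtain ⟨v1, t1⟩ := p
    obtain ⟨⟨j₀, hj₀, hk₀, hg₀⟩, hbd, hmax⟩ := h
    simp only [neonAdd]
    rw [hv, ht]
    by_cases hteq : gN tab j = t1
    · rw [if_pos hteq, WinInv_some]
      refine ⟨?_, ?_, ?_⟩
      · rcases le_total (wkey tab j) v1 with hle | hle
        · exact ⟨j₀, Or.inr hj₀, by rw [hk₀, max_eq_left hle], hg₀⟩
        · exact ⟨j, Or.inl rfl, (max_eq_right hle).symm, hteq⟩
      · rintro j' (rfl | hj')
        · exact le_max_right _ _
        · exact le_trans (hbd j' hj') (le_max_left _ _)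
      · refine OMaxOf_congr ?_ hmax
        intro x
        constructor
        · rintro ⟨j', hj', hne, hk'⟩; exact ⟨j', Or.inr hj', hne, hk'⟩
        · rintro ⟨j', (rfl | hj'), hne, hk'⟩
          · exact absurd hteq hne
          · exact ⟨j', hj', hne, hk'⟩
    · rw [if_neg hteq]
      by_cases hgt : wkey tab j > v1
      · rw [if_pos hgt, WinInv_some]
        refine ⟨⟨j, Or.inl rfl, rfl, rfl⟩, ?_, ?_, ?_⟩
        · rintro j' (rfl | hj')
          · exact le_refl _
          · exact le_trans (hbd j' hj') (le_of_lt hgt)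
        · exact ⟨j₀, Or.inr hj₀, by rw [hg₀]; exact fun e => hteq e.symm, hk₀⟩
        · rintro x ⟨j', (rfl | hj'), hne, hk'⟩
          · exact absurd rfl hne
          · exact hk' ▸ hbd j' hj'
      · rw [if_neg hgt, WinInv_some]
        rw [not_lt] at hgt
        refine ⟨⟨j₀, Or.inr hj₀, hk₀, hg₀⟩, ?_, ?_⟩
        · rintro j' (rfl | hj')
          · exact hgt
          · exact hbd j' hj'
        · cases v2 with
          | none =>
            refine ⟨⟨j, Or.inl rfl, hteq, rfl⟩, ?_⟩
            rintro x ⟨j', (rfl | hj'), hne, hk'⟩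
            · exact le_of_eq hk'.symm
            · exact absurd ⟨j', hj', hne, hk'⟩ (hmax x)
          | some w =>
            obtain ⟨⟨j', hj', hne', hk'⟩, hbd'⟩ := hmax
            refine ⟨?_, ?_⟩
            · rcases le_total (wkey tab j) w with hle | hle
              · refine ⟨j', Or.inr hj', hne', ?_⟩
                show wkey tab j' = max w (wkey tab j)
                rw [hk', max_eq_left hle]
              · refine ⟨j, Or.inl rfl, hteq, ?_⟩
                show wkey tab j = max w (wkey tab j)
                exact (max_eq_right hle).symm
            · rintro x ⟨j'', hcase, hne'', hk''⟩
              show x ≤ max w (wkey tab j)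
              rcases hcase with rfl | hj''
              · exact hk'' ▸ le_max_right _ _
              · exact le_trans (hbd' x ⟨j'', hj'', hne'', hk''⟩) (le_max_left _ _)

theorem query_omax {tab : List Int} {W : Nat → Prop} {st : Option (Int × Int) × Option Int}
    (h : WinInv tab W st) (t : Int) :
    OMaxOf (fun x => ∃ j, W j ∧ gN tab j ≠ t ∧ wkey tab j = x)
      (match st.1 with
       | none => none
       | some (v1, t1) => if t1 = t then st.2 else some v1) := by
  obtain ⟨o, v2⟩ := st
  cases o with
  | none =>
    rintro x ⟨j, hj, -, -⟩
    exact h.1 j hj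
  | some p =>
    obtain ⟨v1, t1⟩ := p
    obtain ⟨⟨j₀, hj₀, hk₀, hg₀⟩, hbd, hmax⟩ := h
    by_cases hteq : t1 = t
    · simp only [hteq] at hmax ⊢
      exact (if_pos trivial : (if True then v2 else some v1) = v2) ▸ hmax
    · simp only []
      rw [if_neg hteq]
      exact ⟨⟨j₀, hj₀, by rw [hg₀]; exact hteq, hk₀⟩,
        fun x ⟨j', hj', hne, hk'⟩ => hk' ▸ hbd j' hj'⟩


theorem WinInv_congr {tab : List Int} {W W' : Nat → Prop}
    {st : Option (Int × Int) × Option Int}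
    (hWW : ∀ j, W j ↔ W' j) (h : WinInv tab W st) : WinInv tab W' st := by
  obtain ⟨o, v2⟩ := st
  cases o with
  | none => exact ⟨fun j hj => h.1 j ((hWW j).mpr hj), h.2⟩
  | some p =>
    obtain ⟨v1, t1⟩ := p
    obtain ⟨⟨j, hj, hk, hg⟩, hbd, hmax⟩ := h
    refine ⟨⟨j, (hWW j).mp hj, hk, hg⟩, fun j' hj' => hbd j' ((hWW j').mpr hj'), ?_⟩
    refine OMaxOf_congr ?_ hmax
    intro x
    constructor
    · rintro ⟨j', hj', hne, hk'⟩; exact ⟨j', (hWW j').mp hj', hne, hk'⟩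
    · rintro ⟨j', hj', hne, hk'⟩; exact ⟨j', (hWW j').mpr hj', hne, hk'⟩

theorem score_split {tab : List Int} {i j : Nat} (hij : i < j) :
    scoreN tab i j = (gN tab i - 2 * (i : Int)) + wkey tab j := by
  have habs : |(i : Int) - (j : Int)| = (j : Int) - (i : Int) := by
    rw [abs_sub_comm]
    exact abs_of_nonneg (by omega)
  unfold scoreN wkey
  rw [habs]
  ring

theorem covered_split {tab : List Int} {K : Nat} (hK : K < tab.length / 2) :
    ∀ x, covered tab (K + 1) x ↔ covered tab K x ∨
      (∃ y, (∃ j, WSet tab (K + 1) j ∧ gN tab j ≠ gN tab (tab.length / 2 - 1 - K) ∧ wkey tab j = y) ∧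
        x = (gN tab (tab.length / 2 - 1 - K) - 2 * ((tab.length / 2 - 1 - K : Nat) : Int)) + y) := by
  intro x
  unfold covered WSet
  constructor
  · rintro ⟨i', j, hge, hij, hsum, hne, rfl⟩
    rcases (by omega : tab.length / 2 - K ≤ i' ∨ i' = tab.length / 2 - 1 - K) with h | rfl
    · exact Or.inl ⟨i', j, h, hij, hsum, hne, rfl⟩
    · exact Or.inr ⟨wkey tab j, ⟨j, ⟨by omega, by omega⟩, fun e => hne e.symm, rfl⟩, score_split hij⟩
  · rintro (⟨i', j, hge, hij, hsum, hne, rfl⟩ | ⟨y, ⟨j, ⟨hj1, hj2⟩, hne, rfl⟩, rfl⟩)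
    · exact ⟨i', j, by omega, hij, hsum, hne, rfl⟩
    · exact ⟨tab.length / 2 - 1 - K, j, by omega, by omega, by omega, fun e => hne e.symm,
        (score_split (by omega)).symm⟩

theorem step_inv {tab : List Int} {K : Nat}
    {st : Option Int × (Option (Int × Int) × Option Int)}
    (hK : K < tab.length / 2)
    (hw : WinInv tab (WSet tab K) st.2) (hb : OMaxOf (covered tab K) st.1) :
    WinInv tab (WSet tab (K + 1)) (neonStep tab tab.length (tab.length / 2) st K).2 ∧
    OMaxOf (covered tab (K + 1)) (neonStep tab tab.length (tab.length / 2) st K).1 := by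
  obtain ⟨b, w0⟩ := st
  simp only [neonStep]
  have hwin : WinInv tab (WSet tab (K + 1))
      (if tab.length - 1 - (tab.length / 2 - 1 - K) = tab.length / 2 - 1 - K + 1 then
        neonAdd tab w0 (tab.length / 2 - 1 - K + 1)
      else neonAdd tab (neonAdd tab w0 (tab.length / 2 - 1 - K + 1))
        (tab.length - 1 - (tab.length / 2 - 1 - K))) := by
    by_cases hcase : tab.length - 1 - (tab.length / 2 - 1 - K) = tab.length / 2 - 1 - K + 1
    · rw [if_pos hcase]
      refine WinInv_congr ?_ (add_inv hw (tab.length / 2 - 1 - K + 1))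
      intro j
      unfold WSet
      omega
    · rw [if_neg hcase]
      refine WinInv_congr ?_ (add_inv (add_inv hw (tab.length / 2 - 1 - K + 1))
        (tab.length - 1 - (tab.length / 2 - 1 - K)))
      intro j
      unfold WSet
      omega
  have hti : PySem.List.pyGetD tab ((tab.length / 2 - 1 - K : Nat) : Int) 0
      = gN tab (tab.length / 2 - 1 - K) := by
    simp [gN, PySem.List.pyGetD_natCast]
  refine ⟨?_, ?_⟩
  · cases hc : (match (if tab.length - 1 - (tab.length / 2 - 1 - K) = tab.length / 2 - 1 - K + 1 then
        neonAdd tab w0 (tab.length / 2 - 1 - K + 1)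
      else neonAdd tab (neonAdd tab w0 (tab.length / 2 - 1 - K + 1))
        (tab.length - 1 - (tab.length / 2 - 1 - K))).1 with
      | none => (none : Option Int)
      | some (v1, t1) => if t1 = PySem.List.pyGetD tab ((tab.length / 2 - 1 - K : Nat) : Int) 0 then
          (if tab.length - 1 - (tab.length / 2 - 1 - K) = tab.length / 2 - 1 - K + 1 then
            neonAdd tab w0 (tab.length / 2 - 1 - K + 1)
          else neonAdd tab (neonAdd tab w0 (tab.length / 2 - 1 - K + 1))
            (tab.length - 1 - (tab.length / 2 - 1 - K))).2
        else some v1) with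
    | none => simpa [hc] using hwin
    | some c => simpa [hc] using hwin
  · have hq := query_omax hwin (gN tab (tab.length / 2 - 1 - K))
    rw [← hti] at hq
    cases hc : (match (if tab.length - 1 - (tab.length / 2 - 1 - K) = tab.length / 2 - 1 - K + 1 then
        neonAdd tab w0 (tab.length / 2 - 1 - K + 1)
      else neonAdd tab (neonAdd tab w0 (tab.length / 2 - 1 - K + 1))
        (tab.length - 1 - (tab.length / 2 - 1 - K))).1 with
      | none => (none : Option Int)
      | some (v1, t1) => if t1 = PySem.List.pyGetD tab ((tab.length / 2 - 1 - K : Nat) : Int) 0 then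
          (if tab.length - 1 - (tab.length / 2 - 1 - K) = tab.length / 2 - 1 - K + 1 then
            neonAdd tab w0 (tab.length / 2 - 1 - K + 1)
          else neonAdd tab (neonAdd tab w0 (tab.length / 2 - 1 - K + 1))
            (tab.length - 1 - (tab.length / 2 - 1 - K))).2
        else some v1) with
    | none =>
      rw [hc] at hq
      rw [hti] at hq
      refine OMaxOf_congr (fun x => ?_) hb
      rw [covered_split hK]
      constructor
      · exact Or.inl
      · rintro (h | ⟨y, hy, rfl⟩)
        · exact h
        · exact absurd hy (hq y)
    | some c =>
      rw [hc] at hq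
      rw [hti] at hq
      simp only [hti]
      rcases b with _ | bb <;>
        exact OMaxOf_congr (fun x => (covered_split hK x).symm)
          (OMaxOf_combine hb (OMaxOf_shift
            (a := gN tab (tab.length / 2 - 1 - K) - 2 * ((tab.length / 2 - 1 - K : Nat) : Int)) hq))

theorem loop_inv (tab : List Int) (K : Nat) (hK : K ≤ tab.length / 2) :
    WinInv tab (WSet tab K)
      (((List.range K).foldl (neonStep tab tab.length (tab.length / 2)) (none, (none, none))).2) ∧
    OMaxOf (covered tab K)
      (((List.range K).foldl (neonStep tab tab.length (tab.length / 2)) (none, (none, none))).1) := by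
  induction K with
  | zero =>
    constructor
    · exact ⟨fun j hj => by unfold WSet at hj; omega, rfl⟩
    · rintro x ⟨i, j, hi, hij, hsum, -, -⟩
      omega
  | succ K ih =>
    have hK' : K < tab.length / 2 := hK
    have hprev := ih (le_of_lt hK')
    rw [List.range_succ, List.foldl_append, List.foldl_cons, List.foldl_nil]
    exact step_inv hK' hprev.1 hprev.2

theorem valid_iff_covered (tab : List Int) (x : Int) :
    ValidScore tab x ↔ covered tab (tab.length / 2) x := by
  unfold ValidScore covered
  constructor
  · rintro ⟨i, j, hi, hj, hne, rfl⟩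
    rcases lt_trichotomy i j with hij | rfl | hij
    · exact ⟨i, j, by omega, hij, by omega, hne, rfl⟩
    · exact absurd rfl hne
    · refine ⟨j, i, by omega, hij, by omega, fun e => hne e.symm, ?_⟩
      unfold scoreN
      rw [abs_sub_comm]
      ring
  · rintro ⟨i, j, -, hij, hsum, hne, rfl⟩
    exact ⟨i, j, by omega, by omega, hne, rfl⟩

-- ===== VERDICT (by name: the statement is the Claim_ definition above) =====
theorem neon_spec : Claim_equal_neon := by
  intro tab _ _
  unfold Spec_neon
  have hA := A_omax tab
  have hB := (loop_inv tab (tab.length / 2) le_rfl).2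
  have hAB : PySem.List.max? (wynikiL tab) (fun x => x)
      = ((List.range (tab.length / 2)).foldl
          (neonStep tab tab.length (tab.length / 2)) (none, (none, none))).1 :=
    OMaxOf_unique (OMaxOf_congr (valid_iff_covered tab) hA) hB
  rw [neon_eq_max, hAB]
  rfl
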